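-- pv_equiv track=rewrite | github.com/Kacperon/Projekty | ASD/3etap/Zad8/zad8_copy.py | parking
-- ===== SOURCE A (Python) =====
-- def parking(X, Y):
--     m = len(Y)
--     n = len(X)
--     inf = (abs(X[0]-Y[m-1]))*n
--     f = [[inf]*(m) for _ in range(n)]
--     for j in range(m):
--         f[0][j] = abs(X[0]-Y[j])
--     for i in range(1, n):
--         min_sum = inf
--         for j in range(i, m):
--             min_sum = min_sum if min_sum <= f[i-1][j-1] else f[i-1][j-1]#min
--             f[i][j] = min_sum + abs(X[i]-Y[j])
--     min_sum = inf
--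
--     for j in range(n-1, m):#min
--         min_sum = min_sum if min_sum <= f[n-1][j] else f[n-1][j]
--
--     return min_sum
-- ===== SOURCE B (Python) =====
-- def _minl(inf, l):
--     r = inf
--     for v in l:
--         r = min(r, v)
--     return r
--
--
-- def _row(x, Yv, inf, i, prev):
--     return [inf if j < i else abs(x - Yv[j]) + _minl(inf, prev[i-1:j])
--             for j in range(len(Yv))]
--
--
-- def parking(X, Y):
--     m = len(Y)
--     n = len(X)
--     inf = abs(X[0] - Y[m-1]) * n
--     prev = [abs(X[0] - Y[j]) for j in range(m)]
--     for i in range(1, n):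
--         prev = _row(X[i], Y, inf, i, prev)
--     return _minl(inf, prev[n-1:m])
-- ===== Notes on version B (the rewrite author's own statement) =====
-- stated objective: alternative
-- what changed: B drops A's mutated n-by-m table and running-min accumulator: it rebuilds each DP row functionally from the previous row, computing every cell as an explicit inf-seeded min over the slice prev[i-1:j], and takes the final answer as a seeded min over prev[n-1:m].
import Mathlib
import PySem

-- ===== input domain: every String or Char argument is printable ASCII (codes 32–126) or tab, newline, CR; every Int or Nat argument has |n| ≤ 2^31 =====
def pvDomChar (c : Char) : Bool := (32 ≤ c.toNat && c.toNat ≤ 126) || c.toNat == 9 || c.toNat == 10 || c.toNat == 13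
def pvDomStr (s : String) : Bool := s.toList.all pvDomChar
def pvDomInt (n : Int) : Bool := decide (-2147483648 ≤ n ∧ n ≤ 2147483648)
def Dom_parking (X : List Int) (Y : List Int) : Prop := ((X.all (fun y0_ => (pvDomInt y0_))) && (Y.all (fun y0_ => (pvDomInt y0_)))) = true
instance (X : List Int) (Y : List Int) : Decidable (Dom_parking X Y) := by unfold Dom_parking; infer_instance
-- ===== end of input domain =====

-- B rebuilds each DP row from the previous one with an explicit inf-seeded prefix-min over a
-- slice, instead of A's in-place 2D table with a running-min accumulator; alternative, not faster.

-- ===== PORT A =====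
-- A's `x if a <= b else b` min idiom
def pmin (a b : Int) : Int := if a ≤ b then a else b
-- f[i][j] read/write on the 2D table (indices always in range in A, so getD/set are exact)
def get2 (f : List (List Int)) (i j : Nat) : Int := (f.getD i []).getD j 0
def set2 (f : List (List Int)) (i j : Nat) (v : Int) : List (List Int) :=
  f.set i ((f.getD i []).set j v)

-- body of A after the X[0]/Y[m-1] reads succeeded; loops `for i in range(1,n)` /
-- `for j in range(i,m)` / `for j in range(n-1,m)` are folds over List.range of the count
-- with the offset added back (i = k+1, j = i+t, j = (n-1)+t)
def parkingGo (x0 yl : Int) (X Y : List Int) : Int :=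
  let m := Y.length
  let n := X.length
  let inf := |x0 - yl| * (n : Int)
  let f0 : List (List Int) := List.replicate n (List.replicate m inf)
  let f1 := (List.range m).foldl (fun f j => set2 f 0 j |x0 - Y.getD j 0|) f0
  let f2 := (List.range (n - 1)).foldl (fun f k =>
      ((List.range (m - (k + 1))).foldl (fun (st : List (List Int) × Int) t =>
          let j := (k + 1) + t
          let ms := pmin st.2 (get2 st.1 k (j - 1))
          (set2 st.1 (k + 1) j (ms + |X.getD (k + 1) 0 - Y.getD j 0|), ms))
        (f, inf)).1) f1
  (List.range (m - (n - 1))).foldl (fun ms t => pmin ms (get2 f2 (n - 1) ((n - 1) + t))) inf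

def parking (X : List Int) (Y : List Int) : Int :=
  match PySem.List.pyGet? X 0, PySem.List.pyGet? Y ((Y.length : Int) - 1) with
  | some x0, some yl => parkingGo x0 yl X Y
  | _, _ => 0   -- X[0] / Y[m-1] raises IndexError in Python (excluded by Pre_)

-- ===== PORT B =====
-- min([inf] + l)
def minL (inf : Int) (l : List Int) : Int := l.foldl (fun r v => min r v) inf

-- _row: row i of the DP table, each cell an inf-seeded prefix-min over prev[i-1:j]
def rowB (x : Int) (Yv : List Int) (inf : Int) (i : Nat) (prev : List Int) : List Int :=
  (List.range Yv.length).map (fun j =>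
    if j < i then inf
    else |x - Yv.getD j 0| +
      minL inf (PySem.List.slice prev (some ((i - 1 : Nat) : Int)) (some ((j : Nat) : Int))))

def parkingAltGo (x0 yl : Int) (X Y : List Int) : Int :=
  let m := Y.length
  let n := X.length
  let inf := |x0 - yl| * (n : Int)
  let row0 := (List.range m).map (fun j => |x0 - Y.getD j 0|)
  let last := (List.range (n - 1)).foldl
      (fun prev k => rowB (X.getD (k + 1) 0) Y inf (k + 1) prev) row0
  minL inf (PySem.List.slice last (some ((n - 1 : Nat) : Int)) (some ((m : Nat) : Int)))

def parking_alt (X : List Int) (Y : List Int) : Int :=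
  match PySem.List.pyGet? X 0 with
  | none => 0   -- X[0] raises IndexError in Python (excluded by Pre_)
  | some x0 =>
    match PySem.List.pyGet? Y ((Y.length : Int) - 1) with
    | none => 0   -- Y[m-1] raises IndexError in Python (excluded by Pre_)
    | some yl => parkingAltGo x0 yl X Y

-- ===== PRECONDITION & SPEC =====
-- A raises IndexError on X[0] or Y[m-1] when either list is empty; excluded here.
def Pre_parking (X : List Int) (Y : List Int) : Prop := X ≠ [] ∧ Y ≠ []
instance (X : List Int) (Y : List Int) : Decidable (Pre_parking X Y) := by
  unfold Pre_parking; infer_instance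

def pvWitness_parking : List Int × List Int := ([3, -1], [0, 2, 5])

def Spec_parking (X : List Int) (Y : List Int) (out : Int) : Prop := out = parking_alt X Y
instance (X : List Int) (Y : List Int) (out : Int) : Decidable (Spec_parking X Y out) := by
  unfold Spec_parking; infer_instance

-- ===== CLAIM (what is proved, stated in full; the proofs are below) =====
def Claim_equal_parking : Prop :=
  ∀ (X : List Int) (Y : List Int), Dom_parking X Y → Pre_parking X Y →
    Spec_parking X Y (parking X Y)

-- ===== LEMMAS AND PROOFS =====

theorem pmin_eq_min (a b : Int) : pmin a b = min a b := by
  simp [pmin, min_def]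

theorem minL_append (inf : Int) (l : List Int) (a : Int) :
    minL inf (l ++ [a]) = min (minL inf l) a := by
  simp [minL]

theorem take_succ_getD (l : List Int) (c : Nat) (h : c < l.length) :
    l.take (c + 1) = l.take c ++ [l.getD c 0] := by
  rw [List.take_add_one]
  simp [List.getElem?_eq_getElem h, List.getD_eq_getElem?_getD]

theorem getD_drop (l : List Int) (o c : Nat) :
    (l.drop o).getD c 0 = l.getD (o + c) 0 := by
  simp [List.getD_eq_getElem?_getD, List.getElem?_drop]

-- length / getD facts about set2
theorem length_set2 (f : List (List Int)) (i j : Nat) (v : Int) :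
    (set2 f i j v).length = f.length := by
  simp [set2]

theorem getD_set2_self (f : List (List Int)) (i j : Nat) (v : Int) (hi : i < f.length) :
    (set2 f i j v).getD i [] = (f.getD i []).set j v := by
  simp [set2, List.getD_eq_getElem?_getD, hi]

theorem getD_set2_ne (f : List (List Int)) (i i' j : Nat) (v : Int) (h : i' ≠ i) :
    (set2 f i j v).getD i' [] = f.getD i' [] := by
  simp only [set2, List.getD_eq_getElem?_getD, List.getElem?_set]
  rw [if_neg (fun hh => h hh.symm)]

theorem set_map_range (m p : Nat) (_hp : p < m) (h h' : Nat → Int) (v : Int)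
    (hv : h' p = v) (hsame : ∀ j, j ≠ p → h' j = h j) :
    ((List.range m).map h).set p v = (List.range m).map h' := by
  apply List.ext_getElem
  · simp
  · intro j hj _
    simp only [List.getElem_set, List.getElem_map, List.getElem_range]
    by_cases hjp : p = j
    · subst hjp; simp [hv]
    · rw [if_neg hjp, hsame j (fun hh => hjp hh.symm)]

-- window fold: A's running-min scan over r[o..o+c) equals B's seeded min over the window
theorem foldl_pmin_window (r : List Int) (o : Nat) (inf : Int) :
    ∀ c, o + c ≤ r.length →
      (List.range c).foldl (fun ms t => pmin ms (r.getD (o + t) 0)) inf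
        = minL inf ((r.drop o).take c) := by
  intro c
  induction c with
  | zero => intro _; simp [minL]
  | succ c ih =>
    intro h
    rw [List.range_succ, List.foldl_append, List.foldl_cons, List.foldl_nil,
      ih (by omega), take_succ_getD _ c (by rw [List.length_drop]; omega),
      minL_append, pmin_eq_min, getD_drop]

-- B's recursive row sequence
def brow (x0 : Int) (X Y : List Int) (inf : Int) : Nat → List Int
  | 0 => (List.range Y.length).map (fun j => |x0 - Y.getD j 0|)
  | (K + 1) => rowB (X.getD (K + 1) 0) Y inf (K + 1) (brow x0 X Y inf K)

theorem brow_length (x0 : Int) (X Y : List Int) (inf : Int) (K : Nat) :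
    (brow x0 X Y inf K).length = Y.length := by
  cases K <;> simp [brow, rowB]

theorem inner_loop (X Y : List Int) (inf : Int) (k : Nat) (f : List (List Int))
    (prev : List Int) (hlen : k + 1 < f.length) (hprev : f.getD k [] = prev)
    (hm : prev.length = Y.length) (hrow : f.getD (k + 1) [] = List.replicate Y.length inf) :
    ∀ c, c ≤ Y.length - (k + 1) →
      (let st := (List.range c).foldl (fun (st : List (List Int) × Int) t =>
          let j := (k + 1) + t
          let ms := pmin st.2 (get2 st.1 k (j - 1))
          (set2 st.1 (k + 1) j (ms + |X.getD (k + 1) 0 - Y.getD j 0|), ms)) (f, inf);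
       st.1.length = f.length ∧
       (∀ r, r ≠ k + 1 → st.1.getD r [] = f.getD r []) ∧
       st.1.getD (k + 1) [] = (List.range Y.length).map (fun j =>
          if k + 1 ≤ j ∧ j < k + 1 + c then
            |X.getD (k + 1) 0 - Y.getD j 0| + minL inf ((prev.drop k).take (j - k))
          else inf) ∧
       st.2 = minL inf ((prev.drop k).take c)) := by
  intro c
  induction c with
  | zero =>
    intro _
    refine ⟨by simp, by simp, ?_, by simp [minL]⟩
    simp only [List.range_zero, List.foldl_nil]
    rw [hrow]
    apply List.ext_getElem
    · simp
    · intro j hj hj'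
      simp only [List.getElem_replicate, List.getElem_map, List.getElem_range]
      rw [if_neg (by omega)]
  | succ c ih =>
    intro h
    obtain ⟨hL, hO, hR, hM⟩ := ih (by omega)
    rw [List.range_succ, List.foldl_append, List.foldl_cons, List.foldl_nil]
    simp only
    generalize hG : (List.foldl (fun (st : List (List Int) × Int) t =>
        let j := k + 1 + t;
        let ms := pmin st.2 (get2 st.1 k (j - 1));
        (set2 st.1 (k + 1) j (ms + |X.getD (k + 1) 0 - Y.getD j 0|), ms)) (f, inf)
        (List.range c)) = G at hL hO hR hM ⊢
    obtain ⟨F, ms⟩ := G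
    simp only at hL hO hR hM
    have hkc : k + 1 + c - 1 = k + c := by omega
    have hms : pmin ms (get2 F k (k + 1 + c - 1))
        = minL inf ((prev.drop k).take (c + 1)) := by
      rw [hM, hkc]
      unfold get2
      rw [hO k (by omega), hprev,
        take_succ_getD _ c (by rw [List.length_drop]; omega), minL_append,
        pmin_eq_min, getD_drop]
    refine ⟨?_, ?_, ?_, hms⟩
    · rw [length_set2]; exact hL
    · intro r hr
      rw [getD_set2_ne _ _ _ _ _ hr]; exact hO r hr
    · rw [getD_set2_self _ _ _ _ (by rw [hL]; exact hlen), hR, hms]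
      apply set_map_range _ _ (by omega)
      · rw [if_pos (by omega)]
        have h2 : k + 1 + c - k = c + 1 := by omega
        rw [h2, Int.add_comm]
      · intro j hj
        by_cases hc : k + 1 ≤ j ∧ j < k + 1 + c
        · rw [if_pos (by omega), if_pos hc]
        · rw [if_neg (by omega), if_neg hc]

theorem getD_replicate_row (n m : Nat) (inf : Int) (r : Nat) (hr : r < n) :
    (List.replicate n (List.replicate m inf)).getD r [] = List.replicate m inf := by
  simp [List.getD_eq_getElem?_getD, hr]

theorem fill_row0 (Y : List Int) (x0 inf : Int) (f : List (List Int)) (hf : 0 < f.length)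
    (hrow : f.getD 0 [] = List.replicate Y.length inf) :
    ∀ c, c ≤ Y.length →
      (let F := (List.range c).foldl (fun f j => set2 f 0 j |x0 - Y.getD j 0|) f;
       F.length = f.length ∧ (∀ r, r ≠ 0 → F.getD r [] = f.getD r []) ∧
       F.getD 0 [] = (List.range Y.length).map
          (fun j => if j < c then |x0 - Y.getD j 0| else inf)) := by
  intro c
  induction c with
  | zero =>
    refine fun _ => ⟨by simp, by simp, ?_⟩
    simp only [List.range_zero, List.foldl_nil]
    rw [hrow]
    apply List.ext_getElem
    · simp
    · intro j hj hj'
      simp only [List.getElem_replicate, List.getElem_map, List.getElem_range]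
      rw [if_neg (by omega)]
  | succ c ih =>
    intro h
    obtain ⟨hL, hO, hR⟩ := ih (by omega)
    rw [List.range_succ, List.foldl_append, List.foldl_cons, List.foldl_nil]
    generalize hG : (List.foldl (fun f j => set2 f 0 j |x0 - Y.getD j 0|) f
        (List.range c)) = G at hL hO hR ⊢
    refine ⟨by rw [length_set2]; exact hL, ?_, ?_⟩
    · intro r hr
      rw [getD_set2_ne _ _ _ _ _ hr]; exact hO r hr
    · rw [getD_set2_self _ _ _ _ (by rw [hL]; exact hf), hR]
      apply set_map_range _ _ (by omega)
      · rw [if_pos (by omega)]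
      · intro j hj
        by_cases hc : j < c
        · rw [if_pos (by omega), if_pos hc]
        · rw [if_neg (by omega), if_neg hc]

theorem outer_loop (x0 : Int) (X Y : List Int) (inf : Int) (f1 : List (List Int))
    (hlen : f1.length = X.length) (h0 : f1.getD 0 [] = brow x0 X Y inf 0)
    (hrest : ∀ r, 0 < r → r < X.length → f1.getD r [] = List.replicate Y.length inf) :
    ∀ K, K ≤ X.length - 1 →
      (let F := (List.range K).foldl (fun f k =>
          ((List.range (Y.length - (k + 1))).foldl (fun (st : List (List Int) × Int) t =>
              let j := (k + 1) + t
              let ms := pmin st.2 (get2 st.1 k (j - 1))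
              (set2 st.1 (k + 1) j (ms + |X.getD (k + 1) 0 - Y.getD j 0|), ms))
            (f, inf)).1) f1;
       F.length = X.length ∧ F.getD K [] = brow x0 X Y inf K ∧
       (∀ r, K < r → r < X.length → F.getD r [] = List.replicate Y.length inf)) := by
  intro K
  induction K with
  | zero => exact fun _ => ⟨hlen, h0, fun r hr hr' => hrest r hr hr'⟩
  | succ K ih =>
    intro h
    obtain ⟨hL, hB, hRest⟩ := ih (by omega)
    rw [List.range_succ, List.foldl_append, List.foldl_cons, List.foldl_nil]
    generalize hG : (List.foldl (fun f k =>
          ((List.range (Y.length - (k + 1))).foldl (fun (st : List (List Int) × Int) t =>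
              let j := (k + 1) + t
              let ms := pmin st.2 (get2 st.1 k (j - 1))
              (set2 st.1 (k + 1) j (ms + |X.getD (k + 1) 0 - Y.getD j 0|), ms))
            (f, inf)).1) f1 (List.range K)) = F at hL hB hRest ⊢
    obtain ⟨iL, iO, iR, _⟩ := inner_loop X Y inf K F (brow x0 X Y inf K)
      (by rw [hL]; omega) hB (brow_length x0 X Y inf K)
      (hRest (K + 1) (by omega) (by omega)) (Y.length - (K + 1)) (le_refl _)
    refine ⟨by rw [iL, hL], ?_, ?_⟩
    · rw [iR]
      show _ = brow x0 X Y inf (K + 1)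
      rw [brow]
      unfold rowB
      apply List.map_congr_left
      intro j hj
      rw [List.mem_range] at hj
      by_cases hjK : j < K + 1
      · rw [if_neg (by omega), if_pos hjK]
      · rw [if_pos (by omega), if_neg hjK]
        have h1 : (K + 1 - 1 : Nat) = K := by omega
        rw [h1, PySem.List.slice_natCast]
    · intro r hr hr'
      rw [iO r (by omega)]
      exact hRest r (by omega) hr'

theorem bfold_eq_brow (x0 : Int) (X Y : List Int) (inf : Int) :
    ∀ K, (List.range K).foldl (fun prev k => rowB (X.getD (k + 1) 0) Y inf (k + 1) prev)
        (brow x0 X Y inf 0) = brow x0 X Y inf K := by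
  intro K
  induction K with
  | zero => rfl
  | succ K ih =>
    rw [List.range_succ, List.foldl_append, List.foldl_cons, List.foldl_nil, ih, brow]

theorem go_eq (x0 yl : Int) (X Y : List Int) (hX : X ≠ []) :
    parkingGo x0 yl X Y = parkingAltGo x0 yl X Y := by
  have hn : 0 < X.length := List.length_pos_iff.mpr hX
  unfold parkingGo parkingAltGo
  simp only
  obtain ⟨hf1L, hf1O, hf1R⟩ := fill_row0 Y x0 (|x0 - yl| * (X.length : Int))
    (List.replicate X.length (List.replicate Y.length (|x0 - yl| * (X.length : Int))))
    (by simpa using hn) (getD_replicate_row _ _ _ 0 hn) Y.length (le_refl _)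
  have h00 : (List.foldl (fun f j => set2 f 0 j |x0 - Y.getD j 0|)
      (List.replicate X.length (List.replicate Y.length (|x0 - yl| * (X.length : Int))))
      (List.range Y.length)).getD 0 []
      = brow x0 X Y (|x0 - yl| * (X.length : Int)) 0 := by
    rw [hf1R, brow]
    apply List.map_congr_left
    intro j hj
    rw [List.mem_range] at hj
    rw [if_pos hj]
  obtain ⟨hFL, hFB, _⟩ := outer_loop x0 X Y (|x0 - yl| * (X.length : Int)) _
    (by rw [hf1L]; simp) h00
    (fun r hr hr' => by rw [hf1O r (by omega)]; exact getD_replicate_row _ _ _ r hr')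
    (X.length - 1) (le_refl _)
  have hb : (List.range Y.length).map (fun j => |x0 - Y.getD j 0|)
      = brow x0 X Y (|x0 - yl| * (X.length : Int)) 0 := rfl
  rw [hb, bfold_eq_brow, PySem.List.slice_natCast]
  simp only [get2] at hFB ⊢
  simp only [hFB]
  by_cases hnm : X.length - 1 ≤ Y.length
  · exact foldl_pmin_window _ _ _ _ (by rw [brow_length]; omega)
  · have hz : Y.length - (X.length - 1) = 0 := by omega
    rw [hz]
    simp [minL]

-- ===== VERDICT (by name: the statement is the Claim_ definition above) =====
theorem parking_spec : Claim_equal_parking := by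
  intro X Y _ hPre
  obtain ⟨hX, hY⟩ := hPre
  obtain ⟨y, ys, rfl⟩ := List.exists_cons_of_ne_nil hY
  have hy : PySem.List.pyGet? (y :: ys) (((y :: ys).length : Int) - 1)
      = some ((y :: ys)[ys.length]) := by
    have h1 : (((y :: ys).length : Int) - 1) = ((ys.length : Nat) : Int) := by
      simp
    rw [h1, PySem.List.pyGet?_natCast, List.getElem?_eq_getElem (by simp)]
  obtain ⟨x, xs, rfl⟩ := List.exists_cons_of_ne_nil hX
  unfold Spec_parking parking parking_alt
  rw [PySem.List.pyGet?_zero_cons, hy]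
  exact go_eq _ _ _ _ (by simp)
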